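-- pv_equiv track=rewrite | github.com/stsfang/blade-build | src/blade/java_targets.py | __is_valid_maven_id_with_wildcards
-- ===== SOURCE A (Python) =====
-- def __is_valid_maven_id_with_wildcards(id):
--     wildcard = False
--     for part in id.split(':'):
--         if wildcard and part != '*':
--             return False
--         if part == '*':
--             wildcard = True
--     return True
-- ===== SOURCE B (Python) =====
-- def __is_valid_maven_id_with_wildcards(id):
--     parts = id.split(':')
--     if '*' not in parts:
--         return True
--     idx = parts.index('*')
--     return all(p == '*' for p in parts[idx:])
-- ===== Notes on version B (the rewrite author's own statement) =====
-- stated objective: simpler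
-- what changed: Replaces the running-boolean-flag loop with a locate-then-check decomposition: find the index of the first wildcard part with list.index and test that every part from that index onward is a wildcard.
import Mathlib
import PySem

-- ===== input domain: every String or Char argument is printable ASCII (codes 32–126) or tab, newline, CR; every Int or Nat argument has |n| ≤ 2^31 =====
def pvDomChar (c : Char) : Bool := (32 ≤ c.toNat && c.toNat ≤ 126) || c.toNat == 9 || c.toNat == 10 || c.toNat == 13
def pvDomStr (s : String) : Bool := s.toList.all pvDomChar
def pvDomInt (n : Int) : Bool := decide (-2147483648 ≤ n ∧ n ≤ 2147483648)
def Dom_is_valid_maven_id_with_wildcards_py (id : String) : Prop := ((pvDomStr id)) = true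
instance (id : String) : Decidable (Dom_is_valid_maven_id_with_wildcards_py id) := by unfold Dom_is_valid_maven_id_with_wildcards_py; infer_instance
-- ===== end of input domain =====

-- B replaces A's running-boolean-flag loop by a locate-then-check-suffix decomposition (simpler; same O(n) cost).

-- ===== PORT A =====
-- the for-loop with its early `return False` and the `wildcard` flag, as structural recursion
def pvLoopA : List String → Bool → Bool
  | [], _ => true
  | p :: ps, w =>
    if w && !(p == "*") then false
    else pvLoopA ps (if p == "*" then true else w)

def is_valid_maven_id_with_wildcards_py (id : String) : Bool :=
  pvLoopA ((PySem.Str.split? id ":").getD []) false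

-- ===== PORT B =====
def is_valid_maven_id_with_wildcards_py_alt (id : String) : Bool :=
  let parts := (PySem.Str.split? id ":").getD []
  if !(parts.contains "*") then true
  else
    match PySem.List.index? parts "*" with
    | none => true  -- unreachable: '*' ∈ parts here (Python's .index cannot raise)
    | some idx => (PySem.List.slice parts (some (idx : Int)) none).all (· == "*")

-- ===== PRECONDITION & SPEC =====
def Spec_is_valid_maven_id_with_wildcards_py (id : String) (out : Bool) : Prop := out = is_valid_maven_id_with_wildcards_py_alt id
instance (id : String) (out : Bool) : Decidable (Spec_is_valid_maven_id_with_wildcards_py id out) := by unfold Spec_is_valid_maven_id_with_wildcards_py; infer_instance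

-- ===== CLAIM (what is proved, stated in full; the proofs are below) =====
def Claim_equal_is_valid_maven_id_with_wildcards_py : Prop := ∀ (id : String), Dom_is_valid_maven_id_with_wildcards_py id → Spec_is_valid_maven_id_with_wildcards_py id (is_valid_maven_id_with_wildcards_py id)

-- ===== LEMMAS AND PROOFS =====
lemma pvLoopA_true (l : List String) : pvLoopA l true = l.all (· == "*") := by
  induction l with
  | nil => rfl
  | cons p ps ih =>
    by_cases h : p = "*" <;> simp [pvLoopA, h, ih]

lemma pvLoopA_eq (l : List String) :
    pvLoopA l false =
      match PySem.List.index? l "*" with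
      | none => true
      | some idx => ((PySem.List.slice l (some (idx : Int)) none).all (· == "*")) := by
  induction l with
  | nil => rfl
  | cons p ps ih =>
    by_cases h : p = "*"
    · subst h
      rw [PySem.List.index?_cons_self]
      simp [pvLoopA, pvLoopA_true]
    · have hidx : PySem.List.index? (p :: ps) "*" =
          (PySem.List.index? ps "*").map (· + 1) :=
        PySem.List.index?_cons_of_ne ps h
      have hA : pvLoopA (p :: ps) false = pvLoopA ps false := by simp [pvLoopA, h]
      rw [hA, ih, hidx]
      cases hix : PySem.List.index? ps "*" with
      | none => rfl
      | some i =>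
        simp only [Option.map_some, PySem.List.slice_from_natCast,
          List.drop_succ_cons]

-- ===== VERDICT (by name: the statement is the Claim_ definition above) =====
theorem is_valid_maven_id_with_wildcards_py_spec : Claim_equal_is_valid_maven_id_with_wildcards_py := by
  intro id _
  unfold Spec_is_valid_maven_id_with_wildcards_py is_valid_maven_id_with_wildcards_py is_valid_maven_id_with_wildcards_py_alt
  rw [pvLoopA_eq]
  cases hix : PySem.List.index? ((PySem.Str.split? id ":").getD []) "*" with
  | none =>
    have hnm : "*" ∉ (PySem.Str.split? id ":").getD [] :=
      (PySem.List.index?_eq_none_iff _ _).mp hix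
    simp only [hix]
    simp [hnm]
  | some i =>
    have hmem : "*" ∈ (PySem.Str.split? id ":").getD [] := by
      rw [← PySem.List.index?_isSome_iff, hix]
      rfl
    simp only [hix]
    simp [hmem]
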